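-- pv_equiv track=rewrite | github.com/chh4031/Python_Study | 코딩테스트/Coding_Test_EX190.py | solution
-- ===== SOURCE A (Python) =====
-- def solution(order):
--     result = 0
--     for i in order:
--         if "cafe" in i:
--             result += 5000
--         elif "am" in i:
--             result += 4500
--         else:
--             result += 4500
--     return result
-- ===== SOURCE B (Python) =====
-- def solution(order):
--     cafes = [i for i in order if "cafe" in i]
--     others = [i for i in order if "cafe" not in i]
--     return 5000 * len(cafes) + 4500 * len(others)
-- ===== Notes on version B (the rewrite author's own statement) =====
-- stated objective: alternative
-- what changed: B first splits the orders into the cafe group and the rest, then prices each group at once by its size (5000*len(cafes) + 4500*len(others)); A instead walks the list once with a branching running total (whose elif/else both add 4500).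
import Mathlib
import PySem

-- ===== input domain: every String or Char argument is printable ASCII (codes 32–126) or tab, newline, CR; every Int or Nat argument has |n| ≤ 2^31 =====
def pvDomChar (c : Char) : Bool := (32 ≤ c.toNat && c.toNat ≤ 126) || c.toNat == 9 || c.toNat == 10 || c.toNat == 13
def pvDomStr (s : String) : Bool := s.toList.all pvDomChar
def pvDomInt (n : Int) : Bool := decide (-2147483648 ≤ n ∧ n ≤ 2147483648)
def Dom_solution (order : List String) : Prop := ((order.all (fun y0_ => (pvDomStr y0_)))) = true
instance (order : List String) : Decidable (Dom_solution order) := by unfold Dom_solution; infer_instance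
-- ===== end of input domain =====

-- B splits the orders into the cafe group and the rest, then prices each group by its size; A keeps a per-item branching running total. Same values everywhere.

-- ===== PORT A =====
def solution (order : List String) : Int :=
  order.foldl (fun result i =>
    if PySem.Str.isIn "cafe" i then result + 5000
    else if PySem.Str.isIn "am" i then result + 4500
    else result + 4500) 0

-- ===== PORT B =====
def solution_alt (order : List String) : Int :=
  let cafes := order.filter (fun i => PySem.Str.isIn "cafe" i)
  let others := order.filter (fun i => !(PySem.Str.isIn "cafe" i))
  5000 * (cafes.length : Int) + 4500 * (others.length : Int)

-- ===== PRECONDITION & SPEC =====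
def Spec_solution (order : List String) (out : Int) : Prop := out = solution_alt order
instance (order : List String) (out : Int) : Decidable (Spec_solution order out) := by unfold Spec_solution; infer_instance

-- ===== CLAIM (what is proved, stated in full; the proofs are below) =====
def Claim_equal_solution : Prop := ∀ (order : List String), Dom_solution order → Spec_solution order (solution order)

-- ===== LEMMAS AND PROOFS =====
theorem solution_loop (xs : List String) (acc : Int) :
    List.foldl (fun result i =>
      if PySem.Str.isIn "cafe" i then result + 5000
      else if PySem.Str.isIn "am" i then result + 4500
      else result + 4500) acc xs
    = acc + 5000 * ((xs.filter (fun i => PySem.Str.isIn "cafe" i)).length : Int)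
          + 4500 * ((xs.filter (fun i => !(PySem.Str.isIn "cafe" i))).length : Int) := by
  induction xs generalizing acc with
  | nil => simp
  | cons x xs ih =>
    simp only [List.foldl_cons, List.filter_cons]
    by_cases h : PySem.Str.isIn "cafe" x
    · simp only [h, if_true, Bool.not_true, Bool.false_eq_true, if_false, ih, List.length_cons]
      push_cast; ring
    · simp only [h, Bool.false_eq_true, if_false, Bool.not_false, if_true, List.length_cons]
      by_cases h2 : PySem.Str.isIn "am" x <;>
        simp only [h2, if_true, Bool.false_eq_true, if_false, ih] <;>
        (push_cast; ring)

-- ===== VERDICT (by name: the statement is the Claim_ definition above) =====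
theorem solution_spec : Claim_equal_solution := by
  intro order _
  unfold Spec_solution solution solution_alt
  simpa using solution_loop order 0
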